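-- pv_equiv track=rewrite | github.com/FabriceCh/advent-of-code | old/2015/14.py | find_lead
-- ===== SOURCE A (Python) =====
-- def find_lead(deers):
--     maxx, lead = 0, []
--     for d in deers:
--         if d["position"] > maxx:
--             maxx = d["position"]
--             lead = [d]
--         elif d["position"] == maxx:
--             lead.append(d)
--     return lead
-- ===== SOURCE B (Python) =====
-- def find_lead(deers):
--     m = max([0] + [d["position"] for d in deers])
--     return [d for d in deers if d["position"] == m]
-- ===== Notes on version B (the rewrite author's own statement) =====
-- stated objective: simpler
-- what changed: Replaces the single running-max-with-list-reset loop by two plain passes: first compute the winning position as a max floored at 0, then filter the deers whose position equals it.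
import Mathlib
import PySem

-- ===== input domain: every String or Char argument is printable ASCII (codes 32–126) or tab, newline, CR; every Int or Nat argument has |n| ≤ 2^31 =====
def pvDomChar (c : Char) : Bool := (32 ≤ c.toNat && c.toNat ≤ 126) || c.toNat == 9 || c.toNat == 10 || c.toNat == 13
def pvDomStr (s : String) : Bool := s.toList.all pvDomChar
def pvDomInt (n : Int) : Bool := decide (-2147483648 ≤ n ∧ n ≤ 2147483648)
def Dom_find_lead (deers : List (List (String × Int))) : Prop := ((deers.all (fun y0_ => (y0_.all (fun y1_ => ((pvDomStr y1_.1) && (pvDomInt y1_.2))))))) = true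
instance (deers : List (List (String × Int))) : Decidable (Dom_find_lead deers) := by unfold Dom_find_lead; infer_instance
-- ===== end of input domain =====

-- B replaces A's running-max-with-list-reset loop by a max pass (floored at 0) followed by a filter pass (objective: simpler).

-- d["position"]: first-match lookup in the association list (dict with unique keys);
-- returns 0 where Python raises KeyError — those inputs are excluded by Pre_find_lead.
def posOf (d : List (String × Int)) : Int := ((d.lookup "position").getD 0)

-- ===== PORT A =====
-- the for-loop of A over state (maxx, lead)
def findLeadGo (maxx : Int) (lead : List (List (String × Int))) :
    List (List (String × Int)) → Int × List (List (String × Int))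
  | [] => (maxx, lead)
  | d :: rest =>
    if posOf d > maxx then findLeadGo (posOf d) [d] rest
    else if posOf d = maxx then findLeadGo maxx (lead ++ [d]) rest
    else findLeadGo maxx lead rest

def find_lead (deers : List (List (String × Int))) : List (List (String × Int)) :=
  (findLeadGo 0 [] deers).2

-- ===== PORT B =====
def find_lead_alt (deers : List (List (String × Int))) : List (List (String × Int)) :=
  let m : Int := (deers.map posOf).foldl max 0   -- max([0] + [d["position"] for d in deers])
  deers.filter (fun d => posOf d = m)

-- ===== PRECONDITION & SPEC =====
-- Pre_ excludes exactly the inputs where some deer lacks the "position" key (Python A raises KeyError there).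
def Pre_find_lead (deers : List (List (String × Int))) : Prop :=
  (deers.all (fun d => (d.lookup "position").isSome)) = true
instance (deers : List (List (String × Int))) : Decidable (Pre_find_lead deers) := by unfold Pre_find_lead; infer_instance
def pvWitness_find_lead : (List (List (String × Int))) := [[("position", 3)], [("position", 3)], [("position", 1)]]
def Spec_find_lead (deers : List (List (String × Int))) (out : List (List (String × Int))) : Prop := out = find_lead_alt deers
instance (deers : List (List (String × Int))) (out : List (List (String × Int))) : Decidable (Spec_find_lead deers out) := by unfold Spec_find_lead; infer_instance

-- ===== CLAIM (what is proved, stated in full; the proofs are below) =====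
def Claim_equal_find_lead : Prop := ∀ (deers : List (List (String × Int))), Dom_find_lead deers → Pre_find_lead deers → Spec_find_lead deers (find_lead deers)

-- ===== LEMMAS AND PROOFS =====


theorem le_foldl_max (l : List Int) : ∀ (m : Int), m ≤ l.foldl max m := by
  induction l with
  | nil => intro m; simp
  | cons a t ih => intro m; exact le_trans (le_max_left m a) (ih (max m a))

-- Loop invariant: the final lead is (old lead if the max never moved, else []) ++ the suffix's
-- elements whose position equals the final max.
theorem findLeadGo_eq (l : List (List (String × Int))) :
    ∀ (m : Int) (lead : List (List (String × Int))),
    findLeadGo m lead l =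
      ((l.map posOf).foldl max m,
       (if (l.map posOf).foldl max m = m then lead else []) ++
         l.filter (fun d => posOf d = (l.map posOf).foldl max m)) := by
  induction l with
  | nil => intro m lead; simp [findLeadGo]
  | cons d t ih =>
    intro m lead
    by_cases h1 : posOf d > m
    · have hm : max m (posOf d) = posOf d := by omega
      have hle : posOf d ≤ (t.map posOf).foldl max (posOf d) := le_foldl_max _ _
      have hne : (t.map posOf).foldl max (posOf d) ≠ m := by omega
      simp only [findLeadGo, if_pos h1, ih, List.map_cons, List.foldl_cons, hm, List.filter_cons,
        if_neg hne]
      by_cases h2 : (t.map posOf).foldl max (posOf d) = posOf d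
      · simp [h2]
      · have h2' : ¬ posOf d = (t.map posOf).foldl max (posOf d) := fun h => h2 h.symm
        simp [h2, h2']
    · by_cases h2 : posOf d = m
      · have hm : max m (posOf d) = m := by omega
        simp only [findLeadGo, if_neg h1, if_pos h2, ih, List.map_cons, List.foldl_cons, hm,
          List.filter_cons]
        by_cases h3 : (t.map posOf).foldl max m = m
        · simp [h3, h2]
        · have : ¬ posOf d = (t.map posOf).foldl max m := by
            have hle : m ≤ (t.map posOf).foldl max m := le_foldl_max _ _
            omega
          simp [h3, this]
      · have hm : max m (posOf d) = m := by omega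
        simp only [findLeadGo, if_neg h1, if_neg h2, ih, List.map_cons, List.foldl_cons, hm,
          List.filter_cons]
        have : ¬ posOf d = (t.map posOf).foldl max m := by
          have hle : m ≤ (t.map posOf).foldl max m := le_foldl_max _ _
          omega
        simp [this]

-- ===== VERDICT (by name: the statement is the Claim_ definition above) =====
theorem find_lead_spec : Claim_equal_find_lead := by
  intro deers _ _
  show find_lead deers = find_lead_alt deers
  simp [find_lead, find_lead_alt, findLeadGo_eq]
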